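-- pv_equiv track=rewrite | github.com/rajeshwarideoraj/CodeGuru_Drona | participant_files/hard_lab_reshmitha.py | orderUp
-- ===== SOURCE A (Python) =====
-- def separateOrders(str):
--     if (str.find(",") == -1):
--         return [str]
--     return [str[: str.find(",")]] + separateOrders(str[str.find(",") + 2:])
--
-- def onePlateToAnother(pancakes):
--     if (len(pancakes) == 0):
--         return []
--     else:
--         return [pancakes[len(pancakes) - 1]] + onePlateToAnother(pancakes[:len(pancakes) - 1])
--
-- def orderUp(totalNum, orders):
--     if len(orders) == 0:
--         return ""
--
--     # Process the first order
--     first_order = orders[0]  # Get the first order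
--     formatted_order = separateOrders(first_order)  # Format the order
--     flipped_order = onePlateToAnother(formatted_order)  # Flip the pancakes
--
--     # Calculate the order number
--     order_number = totalNum - len(orders) + 1
--
--     # Print the order
--     return "Order #"+str(order_number)+", your order of "+str(flipped_order)+" pancakes is up!\n"+str(orderUp(totalNum, orders[1:]))
-- ===== SOURCE B (Python) =====
-- def orderUp(totalNum, orders):
--     out = []
--     base = totalNum - len(orders) + 1
--     for i, order in enumerate(orders):
--         # single left-to-right character scan; tokens are PREPENDED so the
--         # list comes out already flipped; the char right after a comma is skipped
--         tokens = []
--         cur = []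
--         skip = False
--         for ch in order:
--             if skip:
--                 skip = False
--             elif ch == ',':
--                 tokens.insert(0, ''.join(cur))
--                 cur = []
--                 skip = True
--             else:
--                 cur.append(ch)
--         tokens.insert(0, ''.join(cur))
--         out.append("Order #" + str(base + i) + ", your order of "
--                    + str(tokens) + " pancakes is up!\n")
--     return ''.join(out)
-- ===== Notes on version B (the rewrite author's own statement) =====
-- stated objective: faster
-- what changed: Replaces A's three recursions (find/slice comma splitter, list flipper, order recursion with repeated string concatenation and orders[1:] copying) by one iterative pass per order: a single left-to-right character scan with a skip flag that closes a token at each comma and PREPENDS it, so the token list comes out already flipped with no separate reverse, assembled with ''.join over enumerate.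
import Mathlib
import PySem

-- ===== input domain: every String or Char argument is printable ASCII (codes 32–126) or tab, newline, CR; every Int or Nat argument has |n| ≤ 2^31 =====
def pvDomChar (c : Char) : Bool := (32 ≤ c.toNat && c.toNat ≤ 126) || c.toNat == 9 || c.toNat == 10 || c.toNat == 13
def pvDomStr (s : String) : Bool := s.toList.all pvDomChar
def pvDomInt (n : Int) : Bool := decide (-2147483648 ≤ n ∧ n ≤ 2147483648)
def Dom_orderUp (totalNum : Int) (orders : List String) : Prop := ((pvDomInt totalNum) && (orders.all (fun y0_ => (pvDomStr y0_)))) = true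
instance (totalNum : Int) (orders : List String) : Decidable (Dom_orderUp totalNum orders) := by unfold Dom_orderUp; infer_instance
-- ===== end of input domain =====

-- B replaces A's three recursions by one left-to-right character scan per order
-- (skip flag after a comma, tokens prepended so they come out already flipped),
-- assembled with "".join (objective: avoids repeated concatenation/slicing).

-- shared helper: Python's str(list_of_strings) / repr of a str (both Pythons call the built-in str())
def pyEscape (q : Char) (c : Char) : List Char :=
  if c = '\\' then ['\\', '\\']
  else if c = q then ['\\', q]
  else if c = '\t' then ['\\', 't']
  else if c = '\n' then ['\\', 'n']
  else if c = '\r' then ['\\', 'r']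
  else [c]

def pyReprStrChars (s : String) : List Char :=
  let cs := s.toList
  let q := if cs.contains '\'' && !(cs.contains '"') then '"' else '\''
  q :: (cs.flatMap (pyEscape q)) ++ [q]

def pyListReprStr (l : List String) : String :=
  String.ofList ('[' :: (PySem.Chars.join [',', ' '] (l.map pyReprStrChars)) ++ [']'])

-- ===== PORT A =====
-- termination lemma for A's comma splitter
theorem splitStep_lt (s : String) (h : PySem.Str.find s "," ≠ -1) :
    (PySem.Str.slice s (some (PySem.Str.find s "," + 2)) none).toList.length < s.toList.length := by
  have h0 : 0 ≤ PySem.Chars.find s.toList ",".toList := by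
    have := PySem.Chars.neg_one_le_find s.toList ",".toList
    have h' : PySem.Chars.find s.toList ",".toList ≠ -1 := by
      simpa [PySem.Str.find] using h
    omega
  have hinf : ",".toList <:+: s.toList := (PySem.Chars.find_nonneg_iff _ _).1 h0
  have hlen : 1 ≤ s.toList.length := by
    have := hinf.length_le; simpa using this
  have hfind : PySem.Str.find s "," = PySem.Chars.find s.toList ",".toList := by
    simp [PySem.Str.find]
  rw [hfind]
  have : (PySem.Str.slice s (some (PySem.Chars.find s.toList ",".toList + 2)) none).toList
      = PySem.Chars.slice s.toList (some (PySem.Chars.find s.toList ",".toList + 2)) none := by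
    simp [PySem.Str.toList_slice]
  rw [this]
  simp only [PySem.Chars.slice, PySem.List.slice_some_none]
  have hle := PySem.Chars.find_le_length s.toList ",".toList
  have hc := PySem.List.clampIdx_le s.toList.length (PySem.Chars.find s.toList ",".toList + 2)
  have hc2 : 1 ≤ PySem.List.clampIdx s.toList.length (PySem.Chars.find s.toList ",".toList + 2) := by
    unfold PySem.List.clampIdx
    split_ifs with h1 h2 <;> omega
  simp only [List.length_drop]
  omega

def separateOrdersA (s : String) : List String :=
  if PySem.Str.find s "," = -1 then [s]
  else PySem.Str.slice s none (some (PySem.Str.find s ",")) ::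
       separateOrdersA (PySem.Str.slice s (some (PySem.Str.find s "," + 2)) none)
termination_by s.toList.length
decreasing_by exact splitStep_lt s (by assumption)

-- pancakes[len(pancakes)-1]: the index is always in range here, so the .getD "" default is unreachable
def onePlateToAnotherA (pancakes : List String) : List String :=
  if pancakes.length = 0 then []
  else (PySem.List.pyGet? pancakes ((pancakes.length : Int) - 1)).getD "" ::
       onePlateToAnotherA (PySem.List.slice pancakes none (some ((pancakes.length : Int) - 1)))
termination_by pancakes.length
decreasing_by
  rename_i h
  have : (pancakes.length : Int) - 1 = ((pancakes.length - 1 : Nat) : Int) := by omega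
  rw [this, PySem.List.slice_to_natCast]
  simp only [List.length_take]
  omega

def orderUp (totalNum : Int) (orders : List String) : String :=
  if orders.length = 0 then ""
  else
    -- orders[0]: in range since orders is nonempty, so the .getD "" default is unreachable
    let first_order := (PySem.List.pyGet? orders 0).getD ""
    let formatted_order := separateOrdersA first_order
    let flipped_order := onePlateToAnotherA formatted_order
    let order_number := totalNum - orders.length + 1
    "Order #" ++ PySem.Int.toStr order_number ++ ", your order of " ++
      pyListReprStr flipped_order ++ " pancakes is up!\n" ++
      orderUp totalNum (PySem.List.slice orders (some 1) none)   -- str(recursive call) = the string itself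
termination_by orders.length
decreasing_by
  rename_i h
  rw [PySem.List.slice_from_one]
  cases orders <;> simp_all

-- ===== PORT B =====
-- Source B's inner for-loop: state (tokens, cur, skip); each comma closes the current
-- token, PREPENDS it to tokens and sets skip so the next character is dropped;
-- at the end the pending cur is prepended, so tokens is the flipped token list.
def scanB : List Char → List String → List Char → Bool → List String
  | [], tokens, cur, _ => String.ofList cur :: tokens
  | c :: rest, tokens, cur, skip =>
    if skip then scanB rest tokens cur false
    else if c = ',' then scanB rest (String.ofList cur :: tokens) [] true
    else scanB rest tokens (cur ++ [c]) false

def orderUp_alt (totalNum : Int) (orders : List String) : String :=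
  let base : Int := totalNum - orders.length + 1
  PySem.Str.join "" ((PySem.List.enumerate orders).map (fun p =>
    "Order #" ++ PySem.Int.toStr (base + p.1) ++ ", your order of " ++
      pyListReprStr (scanB p.2.toList [] [] false) ++ " pancakes is up!\n"))

-- ===== PRECONDITION & SPEC =====
def Spec_orderUp (totalNum : Int) (orders : List String) (out : String) : Prop := out = orderUp_alt totalNum orders
instance (totalNum : Int) (orders : List String) (out : String) : Decidable (Spec_orderUp totalNum orders out) := by unfold Spec_orderUp; infer_instance

-- ===== CLAIM (what is proved, stated in full; the proofs are below) =====
def Claim_equal_orderUp : Prop := ∀ (totalNum : Int) (orders : List String), Dom_orderUp totalNum orders → Spec_orderUp totalNum orders (orderUp totalNum orders)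

-- ===== LEMMAS AND PROOFS =====

-- scanning a comma-free prefix only extends cur
theorem scanB_pre (pre : List Char) (cs : List Char) (tok : List String) (cur : List Char)
    (h : ',' ∉ pre) : scanB (pre ++ cs) tok cur false = scanB cs tok (cur ++ pre) false := by
  induction pre generalizing cur with
  | nil => simp
  | cons c p ih =>
    have hc : c ≠ ',' := fun hc => h (by simp [hc])
    have hp : ',' ∉ p := fun hp => h (by simp [hp])
    simp only [List.cons_append, scanB, if_neg (Bool.false_ne_true), if_neg hc]
    rw [ih _ hp, List.append_assoc]
    rfl

-- the skip flag drops exactly the next character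
theorem scanB_skip (rest : List Char) (tok : List String) :
    scanB rest tok [] true = scanB (rest.drop 1) tok [] false := by
  cases rest with
  | nil => rfl
  | cons c r => simp [scanB]

-- the char scan computes A's split, already reversed, on top of the accumulator
theorem scanB_sep (s : String) (tok : List String) :
    scanB s.toList tok [] false = (separateOrdersA s).reverse ++ tok := by
  rw [separateOrdersA]
  split_ifs with h
  · have hni : ¬ (",".toList <:+: s.toList) := by
      exact (PySem.Str.find_eq_neg_one_iff _ _).1 h
    have hmem : ',' ∉ s.toList := by
      intro hm
      obtain ⟨p, q, hpq⟩ := List.append_of_mem hm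
      exact hni ⟨p, q, by simp [hpq]⟩
    have := scanB_pre s.toList [] tok [] hmem
    simp only [List.append_nil, List.nil_append] at this
    rw [this]
    simp [scanB]
  · have hfind : PySem.Str.find s "," = PySem.Chars.find s.toList ",".toList := by
      simp [PySem.Str.find]
    have h0 : 0 ≤ PySem.Chars.find s.toList ",".toList := by
      have := PySem.Chars.neg_one_le_find s.toList ",".toList
      have h' : PySem.Chars.find s.toList ",".toList ≠ -1 := by rw [← hfind]; exact h
      omega
    set j := (PySem.Chars.find s.toList ",".toList).toNat with hjdef
    have hj : PySem.Chars.find s.toList ",".toList = (j : Int) := (Int.toNat_of_nonneg h0).symm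
    have hspec := PySem.Chars.find_spec h0
    obtain ⟨⟨t, ht⟩, hmin⟩ := hspec
    -- ht : ",".toList ++ t = s.toList.drop j
    have ht' : ',' :: t = s.toList.drop j := by simpa using ht
    have hdecomp : s.toList = s.toList.take j ++ ',' :: s.toList.drop (j + 1) := by
      conv_lhs => rw [← List.take_append_drop j s.toList]
      congr 1
      rw [← ht']
      congr 1
      have : s.toList.drop (j + 1) = (s.toList.drop j).drop 1 := by
        rw [List.drop_drop]
      rw [this, ← ht']
      rfl
    have hnc : ',' ∉ s.toList.take j := by
      intro hm
      obtain ⟨i, hi, hgi⟩ := List.mem_iff_getElem.1 hm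
      have hij : i < j := lt_of_lt_of_le hi (by simp)
      have hilen : i < s.toList.length := lt_of_lt_of_le hi (by simp)
      apply hmin i hij
      refine ⟨s.toList.drop (i + 1), ?_⟩
      have : s.toList.drop i = s.toList[i] :: s.toList.drop (i + 1) :=
        List.drop_eq_getElem_cons hilen
      rw [this]
      have hgi' : s.toList[i] = ',' := by
        rw [← hgi, List.getElem_take]
      simp [hgi']
    -- run the scan through the decomposition
    conv_lhs => rw [hdecomp]
    have hsc := scanB_pre (s.toList.take j) (',' :: s.toList.drop (j + 1)) tok [] hnc
    simp only [List.nil_append] at hsc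
    rw [hsc]
    simp only [scanB, if_neg (Bool.false_ne_true), if_pos trivial]
    rw [scanB_skip, List.drop_drop]
    have hrest : (PySem.Str.slice s (some (PySem.Str.find s "," + 2)) none).toList
        = s.toList.drop (j + 1 + 1) := by
      rw [hfind, hj]
      have : ((j : Int) + 2) = ((j + 2 : Nat) : Int) := by push_cast; ring
      rw [this, PySem.Str.toList_slice, PySem.Chars.slice_eq_listSlice,
          PySem.List.slice_from_natCast]
    rw [← hrest, scanB_sep]
    have hhead : PySem.Str.slice s none (some (PySem.Str.find s ","))
        = String.ofList (s.toList.take j) := by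
      apply String.toList_injective
      rw [hfind, hj, PySem.Str.toList_slice, PySem.Chars.slice_eq_listSlice,
          PySem.List.slice_to_natCast]
      simp
    rw [hhead]
    simp
termination_by s.toList.length
decreasing_by
  exact splitStep_lt s (by assumption)

theorem onePlate_eq_reverse (l : List String) : onePlateToAnotherA l = l.reverse := by
  rw [onePlateToAnotherA]
  split_ifs with h
  · simp [List.length_eq_zero_iff.1 h]
  · have hne : l ≠ [] := by
      intro hl; exact h (by simp [hl])
    have hcast : (l.length : Int) - 1 = ((l.length - 1 : Nat) : Int) := by
      have : 0 < l.length := List.length_pos_iff.2 hne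
      omega
    rw [hcast, PySem.List.slice_to_natCast, PySem.List.pyGet?_natCast]
    rw [onePlate_eq_reverse]
    have hget : l[l.length - 1]? = some (l.getLast hne) := by
      rw [List.getLast_eq_getElem]
      exact List.getElem?_eq_getElem _
    rw [hget]
    simp only [Option.getD_some]
    rw [← List.dropLast_eq_take]
    conv_rhs => rw [← List.dropLast_append_getLast hne]
    simp
termination_by l.length
decreasing_by
  simp only [List.length_take]
  have : 0 < l.length := List.length_pos_iff.2 hne
  omega

theorem str_join_empty_cons (x : String) (xs : List String) :
    PySem.Str.join "" (x :: xs) = x ++ PySem.Str.join "" xs := by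
  apply String.toList_injective
  cases xs with
  | nil => simp [PySem.Str.toList_join, PySem.Chars.join_singleton, PySem.Chars.join_nil]
  | cons y ys =>
    simp [PySem.Str.toList_join, PySem.Chars.join_cons_cons]

theorem orderUp_gen (orders : List String) (totalNum N k : Int)
    (hN : N = k + orders.length) :
    orderUp totalNum orders
      = PySem.Str.join "" ((PySem.List.enumerate orders k).map (fun p =>
          "Order #" ++ PySem.Int.toStr (totalNum - N + 1 + p.1) ++ ", your order of " ++
            pyListReprStr (scanB p.2.toList [] [] false) ++ " pancakes is up!\n")) := by
  induction orders generalizing k with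
  | nil => simp [orderUp, PySem.List.enumerate_nil, PySem.Str.join]
  | cons o rest ih =>
    rw [orderUp]
    simp only [List.length_cons, if_neg (Nat.succ_ne_zero _)]
    rw [PySem.List.enumerate_cons, List.map_cons, str_join_empty_cons]
    have h0 : (PySem.List.pyGet? (o :: rest) (0 : Int)).getD "" = o := by
      have : (0 : Int) = ((0 : Nat) : Int) := rfl
      rw [this, PySem.List.pyGet?_natCast]; rfl
    have htail : PySem.List.slice (o :: rest) (some 1) none = rest := by
      rw [PySem.List.slice_from_one]; rfl
    rw [h0, htail, ih (k + 1) (by simp only [List.length_cons] at hN; push_cast at hN ⊢; omega)]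
    have hnum : totalNum - ((rest.length + 1 : Nat) : Int) + 1 = totalNum - N + 1 + k := by
      simp only [List.length_cons] at hN; push_cast at hN ⊢; omega
    have hparts : onePlateToAnotherA (separateOrdersA o) = scanB o.toList [] [] false := by
      rw [onePlate_eq_reverse, scanB_sep]; simp
    simp only [hparts, String.append_assoc]
    rw [hnum]

-- ===== VERDICT (by name: the statement is the Claim_ definition above) =====
theorem orderUp_spec : Claim_equal_orderUp := by
  intro totalNum orders _
  unfold Spec_orderUp orderUp_alt
  simp only [orderUp_gen orders totalNum orders.length 0 (by simp)]
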